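-- pv_equiv track=rewrite | github.com/jaypierce/cp | leetcode/2391.py | garbageCollection
-- ===== SOURCE A (Python) =====
-- from typing import List
--
-- def garbageCollection(garbage: List[str], travel: List[int]) -> int:
--
--     def findLast(letter):
--         for i in range(len(garbage)-1, -1, -1):
--             if letter in garbage[i]:
--                 return i
--         return 0
--
--     def count(letter):
--         time = 0
--         for i in range(len(garbage)):
--             if letter in garbage[i]:
--                 time += garbage[i].count(letter)
--         return time
--
--     #Prefix sum
--     for i in range(1, len(travel)):
--         travel[i] += travel[i-1]
--     travel = [0] + travel
--
--     out = 0
--     for i in 'MPG':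
--         out += (count(i) + travel[findLast(i)])
--     return out
-- ===== SOURCE B (Python) =====
-- from typing import List
--
-- def garbageCollection(garbage: List[str], travel: List[int]) -> int:
--     # One forward pass over garbage: total M/P/G characters and the last index
--     # where each letter appears (0 if never seen), then one prefix-sum lookup
--     # per letter.  Mutates travel in place exactly like A.
--     total = 0
--     lastM = lastP = lastG = 0
--     for i, s in enumerate(garbage):
--         for c in s:
--             if c == 'M':
--                 total += 1
--                 lastM = i
--             elif c == 'P':
--                 total += 1
--                 lastP = i
--             elif c == 'G':
--                 total += 1
--                 lastG = i
--     for i in range(1, len(travel)):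
--         travel[i] += travel[i - 1]
--     travel = [0] + travel
--     return total + travel[lastM] + travel[lastP] + travel[lastG]
-- ===== Notes on version B (the rewrite author's own statement) =====
-- stated objective: alternative
-- what changed: B replaces A's six per-letter passes over garbage (a backward scan and a counting scan for each of M, P, G) with a single forward pass maintaining the running total of M/P/G characters and the last index of each letter; the in-place prefix-sum of travel is kept.
-- outside the precondition, e.g. on garbageCollection(['x', 'M'], []): A raises IndexError, B raises IndexError
import Mathlib
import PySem

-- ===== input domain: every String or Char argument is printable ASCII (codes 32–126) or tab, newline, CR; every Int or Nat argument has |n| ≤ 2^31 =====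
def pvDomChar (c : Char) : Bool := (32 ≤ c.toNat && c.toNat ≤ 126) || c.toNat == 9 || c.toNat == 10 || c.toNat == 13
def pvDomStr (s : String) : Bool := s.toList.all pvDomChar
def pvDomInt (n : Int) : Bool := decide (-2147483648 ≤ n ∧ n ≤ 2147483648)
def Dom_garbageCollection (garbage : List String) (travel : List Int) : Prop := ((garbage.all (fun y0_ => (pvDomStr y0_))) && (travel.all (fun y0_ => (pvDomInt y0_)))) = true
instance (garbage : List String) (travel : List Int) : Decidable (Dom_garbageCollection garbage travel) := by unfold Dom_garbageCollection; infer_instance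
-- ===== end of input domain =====

-- B makes one forward pass over garbage (running total + last index per letter) instead of
-- A's six per-letter scans.  Both Pythons mutate the travel argument in place identically
-- (prefix sums); the equivalence proved here is about the RETURN value.

-- ===== PORT A =====
-- `for i in range(len-1,-1,-1): if letter in garbage[i]: return i` / `return 0`;
-- letter is a single char, so `letter in s` = char membership and s.count(letter) = char count (exact).
-- The `.getD ""` never fires: the index k is always in range.
def pvFindLastAux (garbage : List String) (letter : Char) : Nat → Int
  | 0 => 0
  | k + 1 =>
      if ((PySem.List.pyGet? garbage (k : Int)).getD "").toList.contains letter then (k : Int)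
      else pvFindLastAux garbage letter k

def pvCountA (garbage : List String) (letter : Char) : Int :=
  garbage.foldl
    (fun time s => if s.toList.contains letter then time + (s.toList.count letter : Int) else time) 0

-- `for i in range(1, len(travel)): travel[i] += travel[i-1]` (running sums, prev = updated travel[i-1])
def pvPrefixA : Int → List Int → List Int
  | _, [] => []
  | prev, x :: xs => (prev + x) :: pvPrefixA (prev + x) xs

def garbageCollection (garbage : List String) (travel : List Int) : Int :=
  let t := 0 :: pvPrefixA 0 travel     -- travel = [0] + travel after the prefix-sum loop
  0 + (pvCountA garbage 'M' + PySem.List.pyGetD t (pvFindLastAux garbage 'M' garbage.length) 0)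
    + (pvCountA garbage 'P' + PySem.List.pyGetD t (pvFindLastAux garbage 'P' garbage.length) 0)
    + (pvCountA garbage 'G' + PySem.List.pyGetD t (pvFindLastAux garbage 'G' garbage.length) 0)

-- ===== PORT B =====
-- state = (total, lastM, lastP, lastG); one character step of the forward pass
def pvStepB (i : Int) (st : Int × Int × Int × Int) (c : Char) : Int × Int × Int × Int :=
  if c = 'M' then (st.1 + 1, i, st.2.2.1, st.2.2.2)
  else if c = 'P' then (st.1 + 1, st.2.1, i, st.2.2.2)
  else if c = 'G' then (st.1 + 1, st.2.1, st.2.2.1, i)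
  else st

def pvPrefixB : Int → List Int → List Int
  | _, [] => []
  | prev, x :: xs => (prev + x) :: pvPrefixB (prev + x) xs

def garbageCollection_alt (garbage : List String) (travel : List Int) : Int :=
  let st := (PySem.List.enumerate garbage 0).foldl
      (fun st p => p.2.toList.foldl (pvStepB p.1) st) (0, 0, 0, 0)
  let t := 0 :: pvPrefixB 0 travel
  st.1 + PySem.List.pyGetD t st.2.1 0 + PySem.List.pyGetD t st.2.2.1 0
       + PySem.List.pyGetD t st.2.2.2 0

-- ===== PRECONDITION & SPEC =====
-- Pre_ excludes exactly the inputs where the Pythons raise IndexError: some string containing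
-- 'M'/'P'/'G' sits at an index past len(travel), so travel[last] is out of range after the [0] prepend.
def Pre_garbageCollection (garbage : List String) (travel : List Int) : Prop :=
  ∀ p ∈ PySem.List.enumerate garbage 0,
    ('M' ∈ p.2.toList ∨ 'P' ∈ p.2.toList ∨ 'G' ∈ p.2.toList) → p.1 ≤ (travel.length : Int)
instance (garbage : List String) (travel : List Int) : Decidable (Pre_garbageCollection garbage travel) := by
  unfold Pre_garbageCollection; infer_instance

def pvWitness_garbageCollection : List String × List Int := (["MxP", "GG"], [3])

def Spec_garbageCollection (garbage : List String) (travel : List Int) (out : Int) : Prop := out = garbageCollection_alt garbage travel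
instance (garbage : List String) (travel : List Int) (out : Int) : Decidable (Spec_garbageCollection garbage travel out) := by unfold Spec_garbageCollection; infer_instance

-- ===== CLAIM (what is proved, stated in full; the proofs are below) =====
def Claim_equal_garbageCollection : Prop := ∀ (garbage : List String) (travel : List Int), Dom_garbageCollection garbage travel → Pre_garbageCollection garbage travel → Spec_garbageCollection garbage travel (garbageCollection garbage travel)

-- ===== LEMMAS AND PROOFS =====

theorem pvPrefixB_eq (prev : Int) (l : List Int) : pvPrefixB prev l = pvPrefixA prev l := by
  induction l generalizing prev with
  | nil => rfl
  | cons x xs ih => simp [pvPrefixA, pvPrefixB, ih]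

-- one string's worth of the forward pass, characterised
theorem pvStepB_foldl (cs : List Char) (i t m p q : Int) :
    cs.foldl (pvStepB i) (t, m, p, q) =
      (t + (cs.count 'M' : Int) + (cs.count 'P' : Int) + (cs.count 'G' : Int),
       if 'M' ∈ cs then i else m, if 'P' ∈ cs then i else p, if 'G' ∈ cs then i else q) := by
  induction cs generalizing t m p q with
  | nil => simp
  | cons c cs ih =>
      by_cases hM : c = 'M'
      · subst hM; simp [pvStepB, ih]; omega
      · by_cases hP : c = 'P'
        · subst hP; simp [pvStepB, hM, ih]; omega
        · by_cases hG : c = 'G'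
          · subst hG; simp [pvStepB, hM, hP, ih]; omega
          · simp [pvStepB, hM, hP, hG, ih, Ne.symm hM, Ne.symm hP, Ne.symm hG]

theorem pvCountA_append (g : List String) (s : String) (c : Char) :
    pvCountA (g ++ [s]) c =
      pvCountA g c + (s.toList.count c : Int) := by
  unfold pvCountA
  rw [List.foldl_append]
  simp only [List.foldl_cons, List.foldl_nil]
  by_cases h : c ∈ s.toList
  · simp [h]
  · simp [h, List.count_eq_zero.mpr h]

theorem pvFindLastAux_append (g : List String) (s : String) (c : Char) (k : Nat)
    (hk : k ≤ g.length) :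
    pvFindLastAux (g ++ [s]) c k = pvFindLastAux g c k := by
  induction k with
  | zero => rfl
  | succ k ih =>
      have hlt : k < g.length := hk
      have hget : PySem.List.pyGet? (g ++ [s]) (k : Int) = PySem.List.pyGet? g (k : Int) := by
        simp [PySem.List.pyGet?_natCast, List.getElem?_append_left hlt]
      simp only [pvFindLastAux, hget, ih (Nat.le_of_lt hlt)]

theorem pvFindLastAux_last (g : List String) (s : String) (c : Char) :
    pvFindLastAux (g ++ [s]) c (g ++ [s]).length =
      if c ∈ s.toList then (g.length : Int) else pvFindLastAux g c g.length := by
  have hlen : (g ++ [s]).length = g.length + 1 := by simp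
  rw [hlen]
  have hget : PySem.List.pyGet? (g ++ [s]) ((g.length : Nat) : Int) = some s := by
    simp
  simp only [pvFindLastAux, hget, Option.getD_some]
  by_cases h : c ∈ s.toList
  · simp [h]
  · simp [h, pvFindLastAux_append g s c g.length le_rfl]

-- the whole forward pass equals A's six scans
theorem pvFoldB_eq (g : List String) :
    (PySem.List.enumerate g 0).foldl (fun st p => p.2.toList.foldl (pvStepB p.1) st) (0, 0, 0, 0) =
      (pvCountA g 'M' + pvCountA g 'P' + pvCountA g 'G',
       pvFindLastAux g 'M' g.length, pvFindLastAux g 'P' g.length, pvFindLastAux g 'G' g.length) := by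
  induction g using List.reverseRecOn with
  | nil => rfl
  | append_singleton g s ih =>
      rw [PySem.List.enumerate_append, List.foldl_append, ih]
      simp only [PySem.List.enumerate_cons, PySem.List.enumerate_nil, List.foldl_cons,
        List.foldl_nil, zero_add]
      rw [pvStepB_foldl]
      simp only [pvCountA_append, pvFindLastAux_last]
      simp only [Prod.mk.injEq, and_true]
      ring

theorem pvMain (garbage : List String) (travel : List Int) :
    garbageCollection garbage travel = garbageCollection_alt garbage travel := by
  unfold garbageCollection garbageCollection_alt
  rw [pvFoldB_eq, pvPrefixB_eq]
  ring

-- ===== VERDICT (by name: the statement is the Claim_ definition above) =====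
theorem garbageCollection_spec : Claim_equal_garbageCollection := by
  intro garbage travel _ _
  unfold Spec_garbageCollection
  exact pvMain garbage travel
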